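-- pv_equiv track=rewrite | github.com/YangTaeUk/coddingtest_study | edu/10. 동적 계획법 3/[골드 3]색상환.py | choose_color
-- ===== SOURCE A (Python) =====
-- MOD = 1_000_000_003
--
-- def choose_color(n, k):
--
--     dp = [[0]*(k+1) for _ in range(n+1)]
--     for i in range(n+1):
--         dp[i][1] = i
--         dp[i][0] = 1
--
--     for i in range(2, n+1):
--         for j in range(2, k+1):
--             dp[i][j] = (dp[i - 2][j - 1] + dp[i - 1][j]) % MOD
--
--     return (dp[n - 1][k] + dp[n - 3][k - 1]) % MOD
-- ===== SOURCE B (Python) =====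
-- MOD = 1_000_000_003
--
-- def _comb(m, r):
--     # exact binomial coefficient C(m, r) via the multiplicative formula, O(r)
--     if r < 0 or m < 0 or r > m:
--         return 0
--     out = 1
--     for i in range(r):
--         out = out * (m - i) // (i + 1)
--     return out
--
-- def choose_color(n, k):
--     # ways to pick k pairwise non-adjacent colors on an n-cycle, mod MOD
--     return (_comb(n - k, k) + _comb(n - k - 1, k - 1)) % MOD
-- ===== Notes on version B (the rewrite author's own statement) =====
-- stated objective: faster
-- what changed: Replaces the O(n*k) dynamic-programming table by the closed form C(n-k,k)+C(n-k-1,k-1), computed exactly with an O(k) multiplicative binomial loop.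
-- intended difference: On (n,k)=(1,1) and (2,2), A's negative-index wrap of dp[n-3] makes it return n, but no selection of k pairwise non-adjacent colors on an n-cycle exists there (for n=2,k=2 the two colors are adjacent), so B's 0 is the intended count. — e.g. on choose_color(2, 2): A returns 2, B returns 0
import Mathlib
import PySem

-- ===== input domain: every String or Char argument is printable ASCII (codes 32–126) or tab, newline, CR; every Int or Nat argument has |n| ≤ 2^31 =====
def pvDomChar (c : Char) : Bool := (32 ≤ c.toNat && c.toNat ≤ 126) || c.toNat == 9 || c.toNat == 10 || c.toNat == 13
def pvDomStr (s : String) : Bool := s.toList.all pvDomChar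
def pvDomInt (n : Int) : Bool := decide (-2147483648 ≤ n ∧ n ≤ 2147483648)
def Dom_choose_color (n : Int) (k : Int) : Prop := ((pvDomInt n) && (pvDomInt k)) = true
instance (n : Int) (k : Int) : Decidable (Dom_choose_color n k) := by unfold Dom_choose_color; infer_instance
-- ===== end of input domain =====

-- B replaces A's O(n*k) DP table by the closed form C(n-k,k)+C(n-k-1,k-1) computed
-- with an O(k) multiplicative binomial loop (objective: faster); A and B differ only
-- on (1,1) and (2,2), stated below as D_.

def pvMOD : Int := 1000000003

-- ===== PORT A =====
-- Python list indexing/assignment on Lean Arrays (exact: index resolution is PySem.List.pyIdx?,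
-- i.e. Python's negative-index rule; arrays are used for O(1) element updates so the port
-- evaluates fast, the steps are the same)
def pvAGetD {α : Type} (a : Array α) (i : Int) (d : α) : α :=
  match PySem.List.pyIdx? a.size i with
  | some m => a.getD m d
  | none => d

def pvASetD {α : Type} (a : Array α) (i : Int) (v : α) : Array α :=
  match PySem.List.pyIdx? a.size i with
  | some m => a.setIfInBounds m v
  | none => a

-- Python's `dp[i][j] = ...` mutates the row object dp[i] in place; the inner j-loop is
-- therefore rendered as a fold over that row, written back to dp once (rows i-1, i-2 read
-- by the body are never the mutated row, so the values read are identical)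
def choose_color (n : Int) (k : Int) : Int :=
  let dp : Array (Array Int) :=
    ((PySem.List.pyRange 0 (n+1) 1).map
      (fun _ => (PySem.List.pyRepeat [(0 : Int)] (k+1)).toArray)).toArray
  let dp :=
    (PySem.List.pyRange 0 (n+1) 1).foldl (fun dp i =>
      pvASetD dp i (pvASetD (pvASetD (pvAGetD dp i #[]) 1 i) 0 1)) dp
  let dp :=
    (PySem.List.pyRange 2 (n+1) 1).foldl (fun dp i =>
      pvASetD dp i
        ((PySem.List.pyRange 2 (k+1) 1).foldl (fun row j =>
          pvASetD row j
            (PySem.Int.mod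
              (pvAGetD (pvAGetD dp (i-2) #[]) (j-1) 0
               + pvAGetD (pvAGetD dp (i-1) #[]) j 0) pvMOD)) (pvAGetD dp i #[]))) dp
  PySem.Int.mod
    (pvAGetD (pvAGetD dp (n-1) #[]) k 0
     + pvAGetD (pvAGetD dp (n-3) #[]) (k-1) 0) pvMOD

-- ===== PORT B =====
-- exact binomial coefficient C(m, r) via the multiplicative formula
def pvComb (m r : Int) : Int :=
  if r < 0 ∨ m < 0 ∨ r > m then 0
  else (PySem.List.pyRange 0 r 1).foldl
         (fun out i => PySem.Int.floordiv (out * (m - i)) (i + 1)) 1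

def choose_color_alt (n : Int) (k : Int) : Int :=
  PySem.Int.mod (pvComb (n - k) k + pvComb (n - k - 1) (k - 1)) pvMOD

-- ===== PRECONDITION & SPEC =====
-- Pre_ excludes exactly the inputs on which A raises IndexError: for n < 1 the table is too
-- short for dp[n-3] (or empty), and for k < 1 the rows have no column 1.
def Pre_choose_color (n : Int) (k : Int) : Prop := 1 ≤ n ∧ 1 ≤ k
instance (n : Int) (k : Int) : Decidable (Pre_choose_color n k) := by
  unfold Pre_choose_color; infer_instance

def pvWitness_choose_color : Int × Int := (5, 2)

-- On (n,k)=(1,1) and (2,2), A's negative-index wrap of dp[n-3] makes it return n, but no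
-- selection of k pairwise non-adjacent colors on an n-cycle exists there (for n=2,k=2 the
-- two colors are adjacent), so B's 0 is the intended count.
def D_choose_color (n : Int) (k : Int) : Prop := (n = 1 ∧ k = 1) ∨ (n = 2 ∧ k = 2)
instance (n : Int) (k : Int) : Decidable (D_choose_color n k) := by
  unfold D_choose_color; infer_instance

def Spec_choose_color (n : Int) (k : Int) (out : Int) : Prop :=
  ¬ D_choose_color n k → out = choose_color_alt n k
instance (n : Int) (k : Int) (out : Int) : Decidable (Spec_choose_color n k out) := by
  unfold Spec_choose_color; infer_instance

def pvDiffWitness_choose_color : Int × Int := (2, 2)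
def pvDiffWitnessOut_choose_color : Int × Int := (2, 0)

-- ===== CLAIM (what is proved, stated in full; the proofs are below) =====
def Claim_unchanged_choose_color : Prop := ∀ (n : Int) (k : Int), Dom_choose_color n k →
  Pre_choose_color n k → Spec_choose_color n k (choose_color n k)
def Claim_changed_choose_color : Prop :=
  Dom_choose_color (pvDiffWitness_choose_color.1) (pvDiffWitness_choose_color.2) ∧
  Pre_choose_color (pvDiffWitness_choose_color.1) (pvDiffWitness_choose_color.2) ∧
  D_choose_color (pvDiffWitness_choose_color.1) (pvDiffWitness_choose_color.2) ∧
  choose_color (pvDiffWitness_choose_color.1) (pvDiffWitness_choose_color.2) = pvDiffWitnessOut_choose_color.1 ∧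
  choose_color_alt (pvDiffWitness_choose_color.1) (pvDiffWitness_choose_color.2) = pvDiffWitnessOut_choose_color.2 ∧
  pvDiffWitnessOut_choose_color.1 ≠ pvDiffWitnessOut_choose_color.2
def Claim_exact_choose_color : Prop := ∀ (n : Int) (k : Int), Dom_choose_color n k →
  Pre_choose_color n k → D_choose_color n k → choose_color n k ≠ choose_color_alt n k

-- ===== LEMMAS AND PROOFS =====

def tval : Nat → Nat → Int
  | _, 0 => 1
  | i, 1 => (i : Int)
  | 0, _+2 => 0
  | 1, _+2 => 0
  | i+2, j+2 => PySem.Int.mod (tval i (j+1) + tval (i+1) (j+2)) pvMOD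
termination_by i _ => i

theorem foldl_sim {σ τ ι : Type} (R : σ → τ) (f : σ → ι → σ) (g : τ → ι → τ)
    (h : ∀ s i, R (f s i) = g (R s) i) :
    ∀ (l : List ι) (s : σ), R (l.foldl f s) = l.foldl g (R s) := by
  intro l
  induction l with
  | nil => intro s; rfl
  | cons x xs ih => intro s; rw [List.foldl_cons, List.foldl_cons, ih (f s x), h]

theorem pvAGetD_toList {α : Type} (a : Array α) (i : Int) (d : α) :
    pvAGetD a i d = PySem.List.pyGetD a.toList i d := by
  unfold pvAGetD
  simp only [PySem.List.pyGetD, PySem.List.pyGet?, Array.length_toList]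
  cases h : PySem.List.pyIdx? a.size i with
  | none => rfl
  | some m =>
    show a.getD m d = (a.toList[m]?).getD d
    have hm : a.toList[m]? = a[m]? := by simp
    rw [hm]
    unfold Array.getD
    split
    · rw [Array.getElem?_eq_getElem ‹_›]; rfl
    · rw [Array.getElem?_eq_none (by omega)]; rfl

theorem pvASetD_toList {α : Type} (a : Array α) (i : Int) (v : α) :
    (pvASetD a i v).toList = PySem.List.pySetD a.toList i v := by
  unfold pvASetD
  simp only [PySem.List.pySetD, PySem.List.pySet?, Array.length_toList]
  cases h : PySem.List.pyIdx? a.size i with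
  | none => rfl
  | some m =>
    show (a.setIfInBounds m v).toList = a.toList.set m v
    simp

theorem pyGetD_map {α β : Type} (f : α → β) (l : List α) (i : Int) (d : α) :
    PySem.List.pyGetD (l.map f) i (f d) = f (PySem.List.pyGetD l i d) := by
  simp only [PySem.List.pyGetD, PySem.List.pyGet?, List.length_map]
  cases h : PySem.List.pyIdx? l.length i with
  | none => rfl
  | some m =>
    show ((l.map f)[m]?).getD (f d) = f ((l[m]?).getD d)
    rw [List.getElem?_map]
    cases l[m]? <;> rfl

theorem pySetD_map {α β : Type} (f : α → β) (l : List α) (i : Int) (v : α) :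
    PySem.List.pySetD (l.map f) i (f v) = (PySem.List.pySetD l i v).map f := by
  simp only [PySem.List.pySetD, PySem.List.pySet?, List.length_map]
  cases h : PySem.List.pyIdx? l.length i with
  | none => rfl
  | some m =>
    show (l.map f).set m (f v) = (l.set m v).map f
    simp

theorem pvAGetD_nest (dp : Array (Array Int)) (i : Int) :
    (pvAGetD dp i #[]).toList
      = PySem.List.pyGetD (dp.toList.map (fun r => r.toList)) i [] := by
  rw [pvAGetD_toList]
  have h := pyGetD_map (fun r : Array Int => r.toList) dp.toList i #[]
  simpa using h.symm

theorem pvASetD_nest (dp : Array (Array Int)) (i : Int) (v : Array Int) :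
    (pvASetD dp i v).toList.map (fun r => r.toList)
      = PySem.List.pySetD (dp.toList.map (fun r => r.toList)) i v.toList := by
  rw [pvASetD_toList]
  exact (pySetD_map (fun r : Array Int => r.toList) dp.toList i v).symm

theorem pvAGetD2 (dp : Array (Array Int)) (i j : Int) (d : Int) :
    pvAGetD (pvAGetD dp i #[]) j d
      = PySem.List.pyGetD (PySem.List.pyGetD (dp.toList.map (fun r => r.toList)) i []) j d := by
  rw [pvAGetD_toList, pvAGetD_nest]

-- "update every index s..s+m-1 from its own old value": characterizes both init loops

theorem foldl_diag {α : Type} (G : Int → α → α) (d : α) (s : Nat) :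
    ∀ (m : Nat) (xs : List α), s + m ≤ xs.length →
    ((List.range m).map (fun t => ((s + t : Nat) : Int))).foldl
        (fun dp i => PySem.List.pySetD dp i (G i (PySem.List.pyGetD dp i d))) xs
      = xs.mapIdx (fun t v => if s ≤ t ∧ t < s + m then G (t : Int) v else v) := by
  intro m
  induction m with
  | zero =>
    intro xs _
    simp only [List.range_zero, List.map_nil, List.foldl_nil]
    apply List.ext_getElem (by simp)
    intro i h1 h2
    simp only [List.getElem_mapIdx]
    rw [if_neg (by omega)]
  | succ m ih =>
    intro xs hlen
    rw [List.range_succ, List.map_append, List.foldl_append]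
    rw [ih xs (by omega)]
    simp only [List.map_cons, List.map_nil, List.foldl_cons, List.foldl_nil]
    have hgd : PySem.List.pyGetD
        (xs.mapIdx (fun t v => if s ≤ t ∧ t < s + m then G (t : Int) v else v)) ((s + m : Nat) : Int) d
        = xs[s + m]'(by omega) := by
      rw [PySem.List.pyGetD_natCast]
      rw [List.getD_eq_getElem?_getD]
      rw [List.getElem?_eq_getElem (by simpa using (by omega : s + m < xs.length))]
      simp only [List.getElem_mapIdx, Option.getD_some]
      rw [if_neg (by omega)]
    rw [hgd, PySem.List.pySetD_natCast]
    apply List.ext_getElem (by simp)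
    intro i h1 h2
    rw [List.getElem_set]
    simp only [List.getElem_mapIdx]
    by_cases hi : s + m = i
    · subst hi
      rw [if_pos rfl, if_pos (by omega)]
    · rw [if_neg hi]
      by_cases hc : s ≤ i ∧ i < s + m
      · rw [if_pos hc, if_pos (by omega)]
      · rw [if_neg hc, if_neg (by omega)]

def pvInit (K i : Nat) : List Int :=
  (List.range (K+1)).map (fun j => if j = 0 then 1 else if j = 1 then (i : Int) else 0)

def pvRow (K i : Nat) : List Int := (List.range (K+1)).map (fun j => tval i j)

theorem pvRow_zero (K : Nat) : pvRow K 0 = pvInit K 0 := by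
  unfold pvRow pvInit
  apply List.map_congr_left
  intro j _
  rcases j with _ | _ | j <;> simp [tval]

theorem pvRow_one (K : Nat) : pvRow K 1 = pvInit K 1 := by
  unfold pvRow pvInit
  apply List.map_congr_left
  intro j _
  rcases j with _ | _ | j <;> simp [tval]

theorem pyRange_natCast (s m : Nat) :
    PySem.List.pyRange (s : Int) ((s + m : Nat) : Int) 1
      = (List.range m).map (fun t => ((s + t : Nat) : Int)) := by
  rw [PySem.List.pyRange_one]
  have : (((s + m : Nat) : Int) - (s : Int)).toNat = m := by omega
  rw [this]
  apply List.map_congr_left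
  intro t _
  push_cast
  ring

theorem pyGetD_map_range {β : Type} (f : Nat → β) (m i : Nat) (d : β) (h : i < m) :
    PySem.List.pyGetD ((List.range m).map f) (i : Int) d = f i := by
  rw [PySem.List.pyGetD_natCast, PySem.List.getD_map_range _ _ _ _ h]

theorem inner_row (K m : Nat) (hK : 1 ≤ K) :
    ((List.range (K-1)).map (fun t => ((2 + t : Nat) : Int))).foldl
      (fun row j => PySem.List.pySetD row j
        (PySem.Int.mod
          (PySem.List.pyGetD (pvRow K m) (j-1) 0
           + PySem.List.pyGetD (pvRow K (m+1)) j 0) pvMOD))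
      (pvInit K (2+m))
    = pvRow K (2+m) := by
  have hd := foldl_diag
    (fun j (_ : Int) => PySem.Int.mod
        (PySem.List.pyGetD (pvRow K m) (j-1) 0
         + PySem.List.pyGetD (pvRow K (m+1)) j 0) pvMOD)
    0 2 (K-1) (pvInit K (2+m)) (by simp [pvInit]; omega)
  simp only [] at hd
  rw [hd]
  unfold pvInit pvRow
  apply List.ext_getElem (by simp)
  intro j h1 h2
  simp only [List.getElem_mapIdx, List.getElem_map, List.getElem_range]
  simp only [List.length_mapIdx, List.length_map, List.length_range] at h1 h2
  by_cases hj : 2 ≤ j ∧ j < 2 + (K-1)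
  · rw [if_pos hj]
    have e1 : ((j : Int) - 1) = ((j - 1 : Nat) : Int) := by omega
    rw [e1, pyGetD_map_range _ _ _ _ (by omega), pyGetD_map_range _ _ _ _ (by omega)]
    obtain ⟨jj, rfl⟩ : ∃ jj, j = jj + 2 := ⟨j - 2, by omega⟩
    have : jj + 2 - 1 = jj + 1 := by omega
    rw [this]
    rw [show 2 + m = m + 2 by omega]
    rw [show tval (m+2) (jj+2) = PySem.Int.mod (tval m (jj+1) + tval (m+1) (jj+2)) pvMOD from by simp [tval]]
  · rw [if_neg hj]
    have : j = 0 ∨ j = 1 := by omega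
    rcases this with rfl | rfl <;> simp [tval]

theorem phase2_inv (K N : Nat) (hK : 1 ≤ K) :
    ∀ m, 2 + m ≤ N + 1 →
    ((List.range m).map (fun t => ((2 + t : Nat) : Int))).foldl
      (fun dp i => PySem.List.pySetD dp i
        ((PySem.List.pyRange 2 ((K : Int)+1) 1).foldl
          (fun row j => PySem.List.pySetD row j
            (PySem.Int.mod
              (PySem.List.pyGetD (PySem.List.pyGetD dp (i-2) []) (j-1) 0
               + PySem.List.pyGetD (PySem.List.pyGetD dp (i-1) []) j 0) pvMOD))
          (PySem.List.pyGetD dp i [])))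
      ((List.range (N+1)).map (fun t => pvInit K t))
    = (List.range (N+1)).map (fun t => if t < 2 + m then pvRow K t else pvInit K t) := by
  intro m
  induction m with
  | zero =>
    intro _
    simp only [List.range_zero, List.map_nil, List.foldl_nil]
    apply List.map_congr_left
    intro t _
    by_cases ht : t < 2
    · rw [if_pos ht]
      interval_cases t
      · rw [pvRow_zero]
      · rw [pvRow_one]
    · rw [if_neg ht]
  | succ m ih =>
    intro hm
    have hsplit : ((List.range (m+1)).map (fun t => ((2 + t : Nat) : Int)))
        = (List.range m).map (fun t => ((2 + t : Nat) : Int)) ++ [((2 + m : Nat) : Int)] := by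
      rw [List.range_succ, List.map_append]; rfl
    rw [hsplit, List.foldl_append, ih (by omega)]
    simp only [List.foldl_cons, List.foldl_nil]
    set dp := (List.range (N+1)).map (fun t => if t < 2 + m then pvRow K t else pvInit K t) with hdp
    have hjs : PySem.List.pyRange 2 ((K : Int)+1) 1
        = (List.range (K-1)).map (fun t => ((2 + t : Nat) : Int)) := by
      have := pyRange_natCast 2 (K-1)
      rw [show (((2 + (K-1) : Nat)) : Int) = (K : Int) + 1 by omega] at this
      exact_mod_cast this
    rw [hjs]
    have e2 : (((2+m : Nat) : Int) - 2) = ((m : Nat) : Int) := by push_cast; ring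
    have e1 : (((2+m : Nat) : Int) - 1) = ((m+1 : Nat) : Int) := by push_cast; ring
    have g2 : PySem.List.pyGetD dp (((2+m : Nat) : Int) - 2) [] = pvRow K m := by
      rw [e2, hdp, pyGetD_map_range _ _ _ _ (by omega), if_pos (by omega)]
    have g1 : PySem.List.pyGetD dp (((2+m : Nat) : Int) - 1) [] = pvRow K (m+1) := by
      rw [e1, hdp, pyGetD_map_range _ _ _ _ (by omega), if_pos (by omega)]
    have g0 : PySem.List.pyGetD dp ((2+m : Nat) : Int) [] = pvInit K (2+m) := by
      rw [hdp, pyGetD_map_range _ _ _ _ (by omega), if_neg (by omega)]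
    rw [g2, g1, g0, inner_row K m hK, PySem.List.pySetD_natCast]
    apply List.ext_getElem (by simp [hdp])
    intro t h1 h2
    rw [List.getElem_set]
    simp only [hdp, List.getElem_map, List.getElem_range]
    by_cases ht : 2 + m = t
    · subst ht
      rw [if_pos rfl, if_pos (by omega)]
    · rw [if_neg ht]
      simp only [List.length_set] at h1
      by_cases hc : t < 2 + m
      · rw [if_pos hc, if_pos (by omega)]
      · rw [if_neg hc, if_neg (by omega)]

def pvWrap (N : Nat) : Nat := if 3 ≤ N then N - 3 else if N = 2 then 2 else 0

theorem phase1 (N K : Nat) (hK : 1 ≤ K) :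
    ((List.range (N+1)).map (fun t => ((0 + t : Nat) : Int))).foldl
      (fun dp i => PySem.List.pySetD dp i
        (PySem.List.pySetD (PySem.List.pySetD (PySem.List.pyGetD dp i []) 1 i) 0 1))
      ((List.range (N+1)).map (fun _ => PySem.List.pyRepeat [(0 : Int)] ((K : Int)+1)))
    = (List.range (N+1)).map (fun t => pvInit K t) := by
  rw [foldl_diag (fun i v => PySem.List.pySetD (PySem.List.pySetD v 1 i) 0 1) [] 0 (N+1)
        _ (by simp)]
  apply List.ext_getElem (by simp)
  intro t h1 h2
  simp only [List.getElem_mapIdx, List.getElem_map, List.getElem_range]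
  simp only [List.length_mapIdx, List.length_map, List.length_range] at h1 h2
  rw [if_pos (by omega)]
  rw [PySem.List.pyRepeat_singleton]
  have hrep : ((K : Int)+1).toNat = K+1 := by omega
  rw [hrep]
  rw [show (1:Int) = ((1:Nat):Int) from rfl, show (0:Int) = ((0:Nat):Int) from rfl,
      PySem.List.pySetD_natCast, PySem.List.pySetD_natCast]
  unfold pvInit
  apply List.ext_getElem (by simp)
  intro j hj1 hj2
  rw [List.getElem_set, List.getElem_set]
  simp only [List.getElem_map, List.getElem_range, List.getElem_replicate]
  norm_num
  by_cases hj0 : j = 0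
  · subst hj0; simp
  · rw [if_neg (fun h => hj0 h.symm), if_neg hj0]
    by_cases hj1' : j = 1
    · subst hj1'; simp
    · rw [if_neg (fun h => hj1' h.symm), if_neg hj1']

theorem A_eval (N K : Nat) (hN : 1 ≤ N) (hK : 1 ≤ K) :
    choose_color (N : Int) (K : Int)
      = PySem.Int.mod (tval (N-1) K + tval (pvWrap N) (K-1)) pvMOD := by
  unfold choose_color
  simp only []
  rw [pvAGetD2, pvAGetD2]
  -- step-for-step simulation of the Array program by its List image
  have hstep1 : ∀ (dp : Array (Array Int)) (i : Int),
      ((fun (dp : Array (Array Int)) => dp.toList.map (fun r => r.toList))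
        (pvASetD dp i (pvASetD (pvASetD (pvAGetD dp i #[]) 1 i) 0 1)))
      = PySem.List.pySetD ((fun (dp : Array (Array Int)) => dp.toList.map (fun r => r.toList)) dp) i
          (PySem.List.pySetD (PySem.List.pySetD
            (PySem.List.pyGetD (dp.toList.map (fun r => r.toList)) i []) 1 i) 0 1) := by
    intro dp i
    simp only []
    rw [pvASetD_nest, pvASetD_toList, pvASetD_toList, pvAGetD_nest]
  have hstep2 : ∀ (dp : Array (Array Int)) (i : Int),
      ((fun (dp : Array (Array Int)) => dp.toList.map (fun r => r.toList))
        (pvASetD dp i ((PySem.List.pyRange 2 ((K : Int)+1) 1).foldl (fun row j =>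
          pvASetD row j
            (PySem.Int.mod
              (pvAGetD (pvAGetD dp (i-2) #[]) (j-1) 0
               + pvAGetD (pvAGetD dp (i-1) #[]) j 0) pvMOD)) (pvAGetD dp i #[]))))
      = PySem.List.pySetD ((fun (dp : Array (Array Int)) => dp.toList.map (fun r => r.toList)) dp) i
          ((PySem.List.pyRange 2 ((K : Int)+1) 1).foldl (fun row j =>
            PySem.List.pySetD row j
              (PySem.Int.mod
                (PySem.List.pyGetD (PySem.List.pyGetD (dp.toList.map (fun r => r.toList)) (i-2) []) (j-1) 0
                 + PySem.List.pyGetD (PySem.List.pyGetD (dp.toList.map (fun r => r.toList)) (i-1) []) j 0) pvMOD))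
            (PySem.List.pyGetD (dp.toList.map (fun r => r.toList)) i [])) := by
    intro dp i
    simp only []
    rw [pvASetD_nest]
    congr 1
    have hin := foldl_sim (fun (r : Array Int) => r.toList)
      (fun row j =>
        pvASetD row j
          (PySem.Int.mod
            (pvAGetD (pvAGetD dp (i-2) #[]) (j-1) 0
             + pvAGetD (pvAGetD dp (i-1) #[]) j 0) pvMOD))
      (fun row j =>
        PySem.List.pySetD row j
          (PySem.Int.mod
            (PySem.List.pyGetD (PySem.List.pyGetD (dp.toList.map (fun r => r.toList)) (i-2) []) (j-1) 0
             + PySem.List.pyGetD (PySem.List.pyGetD (dp.toList.map (fun r => r.toList)) (i-1) []) j 0) pvMOD))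
      (by
        intro row j
        simp only []
        rw [pvASetD_toList, pvAGetD2, pvAGetD2])
      (PySem.List.pyRange 2 ((K : Int)+1) 1) (pvAGetD dp i #[])
    simp only [] at hin
    rw [hin, pvAGetD_nest]
  have hmain := foldl_sim (fun (dp : Array (Array Int)) => dp.toList.map (fun r => r.toList))
      (fun dp i =>
        pvASetD dp i ((PySem.List.pyRange 2 ((K : Int)+1) 1).foldl (fun row j =>
          pvASetD row j
            (PySem.Int.mod
              (pvAGetD (pvAGetD dp (i-2) #[]) (j-1) 0
               + pvAGetD (pvAGetD dp (i-1) #[]) j 0) pvMOD)) (pvAGetD dp i #[])))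
      (fun dp i =>
        PySem.List.pySetD dp i
          ((PySem.List.pyRange 2 ((K : Int)+1) 1).foldl (fun row j =>
            PySem.List.pySetD row j
              (PySem.Int.mod
                (PySem.List.pyGetD (PySem.List.pyGetD dp (i-2) []) (j-1) 0
                 + PySem.List.pyGetD (PySem.List.pyGetD dp (i-1) []) j 0) pvMOD))
            (PySem.List.pyGetD dp i [])))
      hstep2 (PySem.List.pyRange 2 ((N : Int)+1) 1)
  have hmid := foldl_sim (fun (dp : Array (Array Int)) => dp.toList.map (fun r => r.toList))
      (fun dp i => pvASetD dp i (pvASetD (pvASetD (pvAGetD dp i #[]) 1 i) 0 1))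
      (fun dp i =>
        PySem.List.pySetD dp i
          (PySem.List.pySetD (PySem.List.pySetD (PySem.List.pyGetD dp i []) 1 i) 0 1))
      hstep1 (PySem.List.pyRange 0 ((N : Int)+1) 1)
  simp only [] at hmain hmid
  rw [hmain, hmid]
  have hinit : ((((PySem.List.pyRange 0 ((N : Int)+1) 1).map
        (fun _ => (PySem.List.pyRepeat [(0 : Int)] ((K : Int)+1)).toArray)).toArray).toList.map
          (fun r => r.toList))
      = (PySem.List.pyRange 0 ((N : Int)+1) 1).map
          (fun _ => PySem.List.pyRepeat [(0 : Int)] ((K : Int)+1)) := by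
    simp
  rw [hinit]
  have hr0 : PySem.List.pyRange 0 ((N : Int)+1) 1
      = (List.range (N+1)).map (fun t => ((0 + t : Nat) : Int)) := by
    have := pyRange_natCast 0 (N+1)
    rw [show (((0 + (N+1) : Nat)) : Int) = (N : Int) + 1 by omega] at this
    exact_mod_cast this
  have hr2 : PySem.List.pyRange 2 ((N : Int)+1) 1
      = (List.range (N-1)).map (fun t => ((2 + t : Nat) : Int)) := by
    have := pyRange_natCast 2 (N-1)
    rw [show (((2 + (N-1) : Nat)) : Int) = (N : Int) + 1 by omega] at this
    exact_mod_cast this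
  rw [hr0, hr2]
  simp only [List.map_map, Function.comp_def]
  rw [phase1 N K hK, phase2_inv K N hK (N-1) (by omega)]
  have hfin : (List.range (N+1)).map (fun t => if t < 2 + (N-1) then pvRow K t else pvInit K t)
      = (List.range (N+1)).map (fun t => pvRow K t) := by
    apply List.map_congr_left
    intro t ht
    rw [List.mem_range] at ht
    by_cases hc : t < 2 + (N-1)
    · rw [if_pos hc]
    · exact absurd (by omega : t < 2 + (N-1)) hc
  rw [hfin]
  have hg1 : PySem.List.pyGetD ((List.range (N+1)).map (fun t => pvRow K t)) ((N : Int) - 1) []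
      = pvRow K (N-1) := by
    rw [show ((N : Int) - 1) = ((N - 1 : Nat) : Int) by omega,
        pyGetD_map_range _ _ _ _ (by omega)]
  have hgk : PySem.List.pyGetD (pvRow K (N-1)) (K : Int) 0 = tval (N-1) K := by
    unfold pvRow
    rw [pyGetD_map_range _ _ _ _ (by omega)]
  have hgk1 : ∀ r, PySem.List.pyGetD (pvRow K r) ((K : Int) - 1) 0 = tval r (K-1) := by
    intro r
    unfold pvRow
    rw [show ((K : Int) - 1) = ((K - 1 : Nat) : Int) by omega,
        pyGetD_map_range _ _ _ _ (by omega)]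
  have hg3 : PySem.List.pyGetD ((List.range (N+1)).map (fun t => pvRow K t)) ((N : Int) - 3) []
      = pvRow K (pvWrap N) := by
    by_cases h3 : 3 ≤ N
    · rw [show ((N : Int) - 3) = ((N - 3 : Nat) : Int) by omega,
          pyGetD_map_range _ _ _ _ (by omega)]
      unfold pvWrap
      rw [if_pos h3]
    · have : N = 1 ∨ N = 2 := by omega
      rcases this with rfl | rfl
      · simp only [List.range_succ, List.range_zero, List.map_append, List.map_cons,
          List.map_nil, List.nil_append]
        norm_num [PySem.List.pyGetD, PySem.List.pyGet?, PySem.List.pyIdx?, pvWrap]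
      · simp only [List.range_succ, List.range_zero, List.map_append, List.map_cons,
          List.map_nil, List.nil_append]
        norm_num [PySem.List.pyGetD, PySem.List.pyGet?, PySem.List.pyIdx?, pvWrap]
  rw [hg1, hgk, hg3, hgk1]

theorem comb_loop (mN : Nat) : ∀ (rN : Nat), rN ≤ mN →
    (PySem.List.pyRange 0 (rN : Int) 1).foldl
      (fun out i => PySem.Int.floordiv (out * ((mN : Int) - i)) (i + 1)) 1
    = (mN.choose rN : Int) := by
  intro rN
  induction rN with
  | zero =>
    intro _
    rw [PySem.List.pyRange_one_eq_nil (by norm_num)]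
    simp
  | succ rN ih =>
    intro h
    rw [show ((rN + 1 : Nat) : Int) = (rN : Int) + 1 by push_cast; ring,
        PySem.List.pyRange_one_succ_right (by positivity), List.foldl_append,
        ih (by omega)]
    simp only [List.foldl_cons, List.foldl_nil]
    have hsub : (mN : Int) - (rN : Int) = ((mN - rN : Nat) : Int) := by omega
    rw [hsub]
    have hmul : (mN.choose rN : Int) * ((mN - rN : Nat) : Int)
        = (mN.choose (rN+1) : Int) * ((rN : Int) + 1) := by
      have h2 : mN.choose (rN+1) * (rN+1) = mN.choose rN * (mN - rN) :=
        Nat.choose_succ_right_eq mN rN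
      exact_mod_cast h2.symm
    rw [hmul, PySem.Int.floordiv_eq_ediv_of_pos (by positivity),
        Int.mul_ediv_cancel _ (by positivity)]

theorem pvComb_nat (mN rN : Nat) : pvComb (mN : Int) (rN : Int) = (mN.choose rN : Int) := by
  unfold pvComb
  by_cases h : rN ≤ mN
  · rw [if_neg (by omega)]
    exact comb_loop mN rN h
  · rw [if_pos (by omega)]
    rw [Nat.choose_eq_zero_of_lt (by omega)]
    rfl

theorem pvComb_neg (m r : Int) (h : m < 0) : pvComb m r = 0 := by
  unfold pvComb
  rw [if_pos (Or.inr (Or.inl h))]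

theorem tval_one (i : Nat) : tval i 1 = (i : Int) := by
  rcases i with _ | _ | i <;> simp [tval]

theorem pascal_t (ii jj : Nat) :
    (ii - jj).choose (jj+1) + (ii - jj).choose (jj+2) = (ii + 1 - jj).choose (jj+2) := by
  by_cases h : jj ≤ ii
  · rw [show ii + 1 - jj = (ii - jj) + 1 by omega]
    exact (Nat.choose_succ_succ (ii - jj) (jj+1)).symm
  · rw [show ii - jj = 0 by omega, show ii + 1 - jj = 0 by omega]
    simp [Nat.choose_eq_zero_of_lt]

theorem tval_choose : ∀ (i j : Nat), 2 ≤ j → tval i j = ((i + 1 - j).choose j : Int) % pvMOD := by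
  intro i
  induction i using Nat.strong_induction_on with
  | _ i ih =>
    intro j hj
    obtain ⟨jj, rfl⟩ : ∃ jj, j = jj + 2 := ⟨j - 2, by omega⟩
    match i with
    | 0 =>
      rw [show (0 + 1 - (jj+2)) = 0 by omega, Nat.choose_eq_zero_of_lt (by omega)]
      simp [tval]
    | 1 =>
      rw [show (1 + 1 - (jj+2)) = 0 by omega, Nat.choose_eq_zero_of_lt (by omega)]
      simp [tval]
    | (ii+2) =>
      rw [show tval (ii+2) (jj+2) = PySem.Int.mod (tval ii (jj+1) + tval (ii+1) (jj+2)) pvMOD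
            from by simp [tval]]
      rw [PySem.Int.mod_eq_emod_of_pos (by norm_num [pvMOD])]
      rw [ih (ii+1) (by omega) (jj+2) (by omega)]
      have hpas : ((ii - jj).choose (jj+1) : Int) + ((ii - jj).choose (jj+2) : Int)
          = ((ii + 1 - jj).choose (jj+2) : Int) := by
        exact_mod_cast congrArg Nat.cast (pascal_t ii jj)
      have htgt : (ii + 2 + 1 - (jj+2)) = ii + 1 - jj := by omega
      have hB : (ii + 1 + 1 - (jj+2)) = ii - jj := by omega
      rw [htgt, hB]
      cases jj with
      | zero =>
        rw [tval_one]
        have h1 : (ii : Int) = ((ii - 0).choose (0+1) : Int) := by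
          simp [Nat.choose_one_right]
        rw [h1, Int.add_emod_emod, hpas]
      | succ jjj =>
        rw [ih ii (by omega) (jjj+2) (by omega)]
        rw [show (ii + 1 - (jjj + 1 + 1)) = ii - (jjj+1) by omega]
        rw [Int.emod_add_emod, Int.add_emod_emod, hpas]

-- first term: tval (N-1) K ≡ pvComb (N-K) K  (mod pvMOD)
theorem term1_cong (N K : Nat) (hN : 1 ≤ N) (hK : 1 ≤ K) :
    tval (N-1) K % pvMOD = pvComb ((N : Int) - K) (K : Int) % pvMOD := by
  by_cases hk2 : 2 ≤ K
  · rw [tval_choose (N-1) K hk2, show (N-1) + 1 - K = N - K by omega]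
    by_cases hNK : K ≤ N
    · rw [show (N : Int) - (K : Int) = ((N - K : Nat) : Int) by omega, pvComb_nat,
          Int.emod_emod_of_dvd _ dvd_rfl]
    · rw [Nat.choose_eq_zero_of_lt (by omega), pvComb_neg _ _ (by omega)]
      norm_num
  · have hK1 : K = 1 := by omega
    subst hK1
    simp only [Nat.cast_one]
    rw [tval_one, show (N : Int) - 1 = ((N - 1 : Nat) : Int) by omega,
        show (1 : Int) = ((1 : Nat) : Int) from rfl, pvComb_nat, Nat.choose_one_right]
-- second term: outside D_, tval (pvWrap N) (K-1) ≡ pvComb (N-K-1) (K-1)  (mod pvMOD)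
theorem term2_cong (N K : Nat) (hN : 1 ≤ N) (hK : 1 ≤ K)
    (hD : ¬ ((N = 1 ∧ K = 1) ∨ (N = 2 ∧ K = 2))) :
    tval (pvWrap N) (K-1) % pvMOD = pvComb ((N : Int) - K - 1) ((K : Int) - 1) % pvMOD := by
  by_cases hk3 : 3 ≤ K
  · rw [tval_choose (pvWrap N) (K-1) (by omega)]
    by_cases h3 : 3 ≤ N
    · unfold pvWrap
      rw [if_pos h3]
      by_cases hNK : K + 1 ≤ N
      · rw [show (N-3) + 1 - (K-1) = N - K - 1 by omega,
            show (N : Int) - K - 1 = ((N - K - 1 : Nat) : Int) by omega,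
            show (K : Int) - 1 = ((K - 1 : Nat) : Int) by omega, pvComb_nat,
            Int.emod_emod_of_dvd _ dvd_rfl]
      · rw [Nat.choose_eq_zero_of_lt (by omega), pvComb_neg _ _ (by omega)]
        norm_num
    · have : N = 1 ∨ N = 2 := by omega
      rcases this with rfl | rfl
      · rw [show pvWrap 1 = 0 from rfl, show 0 + 1 - (K-1) = 0 by omega,
            Nat.choose_eq_zero_of_lt (by omega), pvComb_neg _ _ (by omega)]
        norm_num
      · rw [show pvWrap 2 = 2 from rfl,
            Nat.choose_eq_zero_of_lt (by omega), pvComb_neg _ _ (by omega)]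
        norm_num
  · have : K = 1 ∨ K = 2 := by omega
    rcases this with rfl | rfl
    · -- K = 1: second term is the constant 1 on both sides (N ≥ 2 since (1,1) ∈ D_)
      have hN2 : 2 ≤ N := by
        rcases Nat.lt_or_ge N 2 with h | h
        · exact absurd (Or.inl ⟨by omega, rfl⟩) hD
        · exact h
      simp only [Nat.cast_one]
      rw [show tval (pvWrap N) (1-1) = 1 from by simp [tval],
          show (N : Int) - 1 - 1 = ((N - 2 : Nat) : Int) by omega,
          show (1 : Int) - 1 = ((0 : Nat) : Int) from rfl, pvComb_nat, Nat.choose_zero_right]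
      norm_num
    · -- K = 2: second term is pvWrap N on both sides
      have hN2 : N ≠ 2 := fun h => hD (Or.inr ⟨h, rfl⟩)
      simp only [Nat.cast_ofNat]
      rw [show (2:Nat) - 1 = 1 from rfl, tval_one]
      by_cases h3 : 3 ≤ N
      · unfold pvWrap
        rw [if_pos h3, show (N : Int) - 2 - 1 = ((N - 3 : Nat) : Int) by omega,
            show (2 : Int) - 1 = ((1 : Nat) : Int) from rfl, pvComb_nat, Nat.choose_one_right]
      · have : N = 1 := by omega
        subst this
        rw [show pvWrap 1 = 0 from rfl, pvComb_neg _ _ (by omega)]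
        norm_num

theorem AB_eq (N K : Nat) (hN : 1 ≤ N) (hK : 1 ≤ K)
    (hD : ¬ ((N = 1 ∧ K = 1) ∨ (N = 2 ∧ K = 2))) :
    choose_color (N : Int) (K : Int) = choose_color_alt (N : Int) (K : Int) := by
  rw [A_eval N K hN hK]
  unfold choose_color_alt
  rw [PySem.Int.mod_eq_emod_of_pos (by norm_num [pvMOD]),
      PySem.Int.mod_eq_emod_of_pos (by norm_num [pvMOD])]
  rw [Int.add_emod, term1_cong N K hN hK, term2_cong N K hN hK hD, ← Int.add_emod]

-- ===== VERDICT (by name: the statement is the Claim_ definition above) =====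
theorem choose_color_spec : Claim_unchanged_choose_color := by
  intro n k _ hpre
  obtain ⟨h1, h2⟩ := hpre
  unfold Spec_choose_color
  intro hD
  rw [show n = ((n.toNat : Nat) : Int) from (Int.toNat_of_nonneg (by omega)).symm,
      show k = ((k.toNat : Nat) : Int) from (Int.toNat_of_nonneg (by omega)).symm]
  apply AB_eq n.toNat k.toNat (by omega) (by omega)
  intro h
  apply hD
  unfold D_choose_color
  rcases h with ⟨ha, hb⟩ | ⟨ha, hb⟩
  · exact Or.inl ⟨by omega, by omega⟩
  · exact Or.inr ⟨by omega, by omega⟩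

theorem choose_color_changed : Claim_changed_choose_color := by
  unfold Claim_changed_choose_color; decide

theorem choose_color_tight : Claim_exact_choose_color := by
  intro n k _ _ hD
  unfold D_choose_color at hD
  rcases hD with ⟨rfl, rfl⟩ | ⟨rfl, rfl⟩ <;> decide
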